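-- pv_equiv track=rewrite | github.com/MariyaTokarevaa/algorithm_tasks | find_reachest.py | find_richest
-- ===== SOURCE A (Python) =====
-- def find_richest(accounts: list[list[int]]) -> int:
--     if not accounts or not accounts[0]:
--         return 0
--
--     num_clients = len(accounts[0])
--     max_wealth = 0
--
--     for client_index in range(num_clients):
--         current_client_wealth = 0
--         for bank_account in accounts:
--             current_client_wealth += bank_account[client_index]
--
--         if current_client_wealth > max_wealth:
--             max_wealth = current_client_wealth
--
--     return max_wealth
-- ===== SOURCE B (Python) =====
-- def find_richest(accounts: list[list[int]]) -> int:
--     if not accounts or not accounts[0]: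
--         return 0
--     totals = [0] * len(accounts[0])
--     for row in accounts:
--         totals = [t + x for t, x in zip(totals, row)]
--     return max(0, max(totals))
-- ===== Notes on version B (the rewrite author's own statement) =====
-- stated objective: alternative
-- what changed: Loop interchange: one row-major pass maintaining a running column-totals vector (zip-add per row), with the 0-floored maximum taken once at the end, instead of A's per-column complete-then-compare rescans of all rows.
import Mathlib
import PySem

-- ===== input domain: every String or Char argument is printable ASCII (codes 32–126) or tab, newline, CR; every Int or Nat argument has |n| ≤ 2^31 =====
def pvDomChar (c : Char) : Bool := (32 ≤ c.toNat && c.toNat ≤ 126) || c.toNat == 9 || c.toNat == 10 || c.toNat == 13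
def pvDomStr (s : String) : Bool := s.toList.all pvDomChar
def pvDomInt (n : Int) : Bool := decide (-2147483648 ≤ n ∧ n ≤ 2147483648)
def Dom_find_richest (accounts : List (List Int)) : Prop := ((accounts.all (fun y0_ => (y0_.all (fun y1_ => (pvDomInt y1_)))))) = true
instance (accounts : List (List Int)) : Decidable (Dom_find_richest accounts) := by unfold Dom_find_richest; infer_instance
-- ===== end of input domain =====

-- B replaces A's per-column rescans by one row-major pass over a running column-totals vector (alternative decomposition, same cost).


-- ===== PORT A =====
-- per column: sum the column over all rows, keep the running maximum (starting at 0).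
-- row.getD j 0 is Python's row[j]: in range for every visited j under Pre_find_richest.
def find_richest (accounts : List (List Int)) : Int :=
  if accounts = [] ∨ accounts.headD [] = [] then 0
  else
    let num_clients := (accounts.headD []).length
    (List.range num_clients).foldl
      (fun max_wealth client_index =>
        let current_client_wealth :=
          accounts.foldl (fun acc bank_account => acc + bank_account.getD client_index 0) 0
        if current_client_wealth > max_wealth then current_client_wealth else max_wealth) 0

-- ===== PORT B =====
-- one pass over the rows, zip-adding each row into the running totals; then max(0, max(totals)).
def find_richest_alt (accounts : List (List Int)) : Int :=
  if accounts = [] ∨ accounts.headD [] = [] then 0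
  else
    let totals := accounts.foldl
      (fun ts row => (ts.zip row).map (fun p => p.1 + p.2))
      (List.replicate (accounts.headD []).length 0)
    match totals with
    | [] => 0  -- unreachable under Pre_find_richest: totals keeps the (positive) first-row length
    | t :: ts => max 0 (ts.foldl max t)

-- ===== PRECONDITION & SPEC =====
-- Pre_ excludes exactly the inputs on which A raises IndexError: a row shorter than the first row.
def Pre_find_richest (accounts : List (List Int)) : Prop :=
  ∀ row ∈ accounts, (accounts.headD []).length ≤ row.length
instance (accounts : List (List Int)) : Decidable (Pre_find_richest accounts) := by
  unfold Pre_find_richest; infer_instance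
def pvWitness_find_richest : List (List Int) := [[1, -2], [3, 4]]

def Spec_find_richest (accounts : List (List Int)) (out : Int) : Prop := out = find_richest_alt accounts
instance (accounts : List (List Int)) (out : Int) : Decidable (Spec_find_richest accounts out) := by unfold Spec_find_richest; infer_instance

-- ===== CLAIM (what is proved, stated in full; the proofs are below) =====
def Claim_equal_find_richest : Prop := ∀ (accounts : List (List Int)), Dom_find_richest accounts → Pre_find_richest accounts → Spec_find_richest accounts (find_richest accounts)

-- ===== LEMMAS AND PROOFS =====

-- the sum of column j over rows (A's inner loop)
def colsum (rows : List (List Int)) (j : Nat) : Int :=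
  rows.foldl (fun acc r => acc + r.getD j 0) 0

theorem colsum_shift (rows : List (List Int)) (j : Nat) (a : Int) :
    rows.foldl (fun acc r => acc + r.getD j 0) a = a + colsum rows j := by
  induction rows generalizing a with
  | nil => simp only [List.foldl_nil, colsum]; ring
  | cons r rs ih =>
    rw [List.foldl_cons, ih]
    have hc : colsum (r :: rs) j = (0 + r.getD j 0) + colsum rs j := by
      simp only [colsum, List.foldl_cons]
      exact ih _
    rw [hc]
    ring

theorem zip_add_map (g : Nat → Int) (row : List Int) (n : Nat) (h : n ≤ row.length) :
    (((List.range n).map g).zip row).map (fun p => p.1 + p.2)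
      = (List.range n).map (fun j => g j + row.getD j 0) := by
  apply List.ext_getElem
  · simp [Nat.min_eq_left h]
  · intro i h1 h2
    have hi : i < n := by simpa using h2
    have hir : i < row.length := lt_of_lt_of_le hi h
    simp [List.getElem_zip, List.getElem?_eq_getElem hir]

theorem totals_eq (rows : List (List Int)) (n : Nat) (h : ∀ r ∈ rows, n ≤ r.length)
    (g : Nat → Int) :
    rows.foldl (fun ts row => (ts.zip row).map (fun p => p.1 + p.2)) ((List.range n).map g)
      = (List.range n).map (fun j => g j + colsum rows j) := by
  induction rows generalizing g with
  | nil => simp [colsum]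
  | cons r rs ih =>
    simp only [List.foldl_cons]
    rw [zip_add_map g r n (h r (by simp))]
    rw [ih (fun r hr => h r (by simp [hr])) (fun j => g j + r.getD j 0)]
    apply List.map_congr_left
    intro j _
    have : colsum (r :: rs) j = r.getD j 0 + colsum rs j := by
      simp only [colsum, List.foldl_cons, zero_add]
      exact colsum_shift rs j _
    rw [this]; ring

theorem foldl_if_max (l : List Nat) (g : Nat → Int) (a : Int) :
    l.foldl (fun m j => if g j > m then g j else m) a = (l.map g).foldl max a := by
  induction l generalizing a with
  | nil => rfl
  | cons x xs ih =>
    simp only [List.foldl_cons, List.map_cons, ih]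
    congr 1
    rcases lt_or_ge a (g x) with h | h
    · simp [h, max_eq_right (le_of_lt h)]
    · simp [not_lt.mpr h, max_eq_left h]

theorem foldl_max_out (xs : List Int) (c a : Int) :
    xs.foldl max (max c a) = max c (xs.foldl max a) := by
  induction xs generalizing a with
  | nil => rfl
  | cons x t ih =>
    simp only [List.foldl_cons]
    rw [max_assoc, ih]

theorem find_richest_spec : Claim_equal_find_richest := by
  intro accounts _ hPre
  unfold Spec_find_richest find_richest find_richest_alt
  by_cases hg : accounts = [] ∨ accounts.headD [] = []
  · rw [if_pos hg, if_pos hg]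
  · rw [if_neg hg, if_neg hg]
    have hrep : List.replicate (accounts.headD []).length (0 : Int)
        = (List.range (accounts.headD []).length).map (fun _ => (0 : Int)) := by
      simp [List.map_const']
    rw [hrep, totals_eq accounts _ hPre (fun _ => 0)]
    have h2 : accounts.headD [] ≠ [] := fun h => hg (Or.inr h)
    have hnpos : 0 < (accounts.headD []).length := List.length_pos_iff.mpr h2
    obtain ⟨m, hm⟩ : ∃ m, (accounts.headD []).length = m + 1 :=
      ⟨(accounts.headD []).length - 1, by omega⟩
    rw [hm]
    have key := foldl_if_max (List.range (m + 1)) (fun j => colsum accounts j) 0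
    simp only [colsum] at key
    simp only [zero_add, colsum]
    rw [key, List.range_succ_eq_map, List.map_cons, List.foldl_cons, foldl_max_out]
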